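-- pv_equiv track=rewrite | github.com/mlliu/Natural-Language-Processing-Coursework | hw-parse/.ipynb_checkpoints/parse3-checkpoint.py | pointer_advanced
-- ===== SOURCE A (Python) =====
-- from typing import Counter as CounterType, Iterable, List, Optional, Dict, Tuple
--
-- def pointer_advanced(old_backpointer:List, coordinate:Tuple)-> List:
--     """build a new pointer copy old pointer, but replace the first None as coordinate"""
--     new_backpointer = []
--     count =0
--     for e in old_backpointer:
--         if e==None and count==0:
--             new_backpointer.append(coordinate)
--             count+=1
--         else:
--             new_backpointer.append(e)
--     return new_backpointer
-- ===== SOURCE B (Python) =====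
-- def pointer_advanced(old_backpointer, coordinate):
--     """Copy the list, then locate the first None with .index and replace that slot."""
--     new_backpointer = list(old_backpointer)
--     if None in new_backpointer:
--         new_backpointer[new_backpointer.index(None)] = coordinate
--     return new_backpointer
-- ===== Notes on version B (the rewrite author's own statement) =====
-- stated objective: idiomatic
-- what changed: Replaces the fused flag-carrying append loop by copy + membership test + .index locating the first None, replacing one slot in place.
import Mathlib
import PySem

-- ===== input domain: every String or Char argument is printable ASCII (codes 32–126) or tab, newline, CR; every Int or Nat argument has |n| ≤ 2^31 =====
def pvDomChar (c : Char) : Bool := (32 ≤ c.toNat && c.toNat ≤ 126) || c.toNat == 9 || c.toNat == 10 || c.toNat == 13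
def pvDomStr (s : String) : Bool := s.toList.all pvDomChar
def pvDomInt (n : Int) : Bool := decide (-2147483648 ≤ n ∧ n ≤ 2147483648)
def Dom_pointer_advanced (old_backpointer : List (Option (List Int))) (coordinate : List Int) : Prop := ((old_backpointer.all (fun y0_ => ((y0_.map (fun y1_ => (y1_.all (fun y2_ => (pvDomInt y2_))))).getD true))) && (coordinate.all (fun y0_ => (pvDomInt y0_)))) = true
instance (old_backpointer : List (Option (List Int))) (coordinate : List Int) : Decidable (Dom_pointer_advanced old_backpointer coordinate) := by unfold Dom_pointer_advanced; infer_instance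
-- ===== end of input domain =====

-- B change: copy + membership test + .index of the first None replacing one slot, instead of A's fused append loop with a count flag (idiomatic).

-- ===== PORT A =====
-- for-loop over old_backpointer carrying (new_backpointer, count)
def pointer_advanced (old_backpointer : List (Option (List Int))) (coordinate : List Int) : List (Option (List Int)) :=
  (old_backpointer.foldl
    (fun (acc : List (Option (List Int)) × Int) e =>
      if e = none ∧ acc.2 = 0 then (acc.1 ++ [some coordinate], acc.2 + 1)
      else (acc.1 ++ [e], acc.2))
    ([], 0)).1

-- ===== PORT B =====
-- new = list(old); if None in new: new[new.index(None)] = coordinate; return new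
def pointer_advanced_alt (old_backpointer : List (Option (List Int))) (coordinate : List Int) : List (Option (List Int)) :=
  let new_backpointer := old_backpointer
  if new_backpointer.contains none then
    match PySem.List.index? new_backpointer none with
    | some i => new_backpointer.set i (some coordinate)
    | none => new_backpointer
  else new_backpointer

-- ===== PRECONDITION & SPEC =====
def Spec_pointer_advanced (old_backpointer : List (Option (List Int))) (coordinate : List Int) (out : List (Option (List Int))) : Prop := out = pointer_advanced_alt old_backpointer coordinate
instance (old_backpointer : List (Option (List Int))) (coordinate : List Int) (out : List (Option (List Int))) : Decidable (Spec_pointer_advanced old_backpointer coordinate out) := by unfold Spec_pointer_advanced; infer_instance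

-- ===== CLAIM (what is proved, stated in full; the proofs are below) =====
def Claim_equal_pointer_advanced : Prop := ∀ (old_backpointer : List (Option (List Int))) (coordinate : List Int), Dom_pointer_advanced old_backpointer coordinate → Spec_pointer_advanced old_backpointer coordinate (pointer_advanced old_backpointer coordinate)

-- ===== LEMMAS AND PROOFS =====

-- once count ≠ 0, A's loop just appends the rest
theorem pvA_loop_done (coordinate : List Int) :
    ∀ (l : List (Option (List Int))) (acc : List (Option (List Int))) (c : Int), c ≠ 0 →
      (l.foldl
        (fun (acc : List (Option (List Int)) × Int) e =>
          if e = none ∧ acc.2 = 0 then (acc.1 ++ [some coordinate], acc.2 + 1)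
          else (acc.1 ++ [e], acc.2))
        (acc, c)).1 = acc ++ l := by
  intro l
  induction l with
  | nil => intro acc c hc; simp
  | cons e l ih =>
    intro acc c hc
    simp only [List.foldl_cons]
    rw [if_neg (by simp [hc])]
    simpa using ih (acc ++ [e]) c hc

-- B's port steps through a non-None head
theorem pvB_cons_ne (coordinate : List Int) (e : Option (List Int)) (l : List (Option (List Int)))
    (he : e ≠ none) :
    pointer_advanced_alt (e :: l) coordinate = e :: pointer_advanced_alt l coordinate := by
  have hne : ¬ (none : Option (List Int)) = e := fun h => he h.symm
  have hidx : List.idxOf? (none : Option (List Int)) (e :: l) = (List.idxOf? none l).map (· + 1) := by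
    simp [List.idxOf?, List.findIdx?_cons, he]
  by_cases hm : (none : Option (List Int)) ∈ l
  · obtain ⟨j, hj⟩ : ∃ j, List.idxOf? (none : Option (List Int)) l = some j := by
      cases h : List.idxOf? (none : Option (List Int)) l with
      | none => rw [List.idxOf?_eq_none_iff] at h; exact absurd hm h
      | some j => exact ⟨j, rfl⟩
    simp [pointer_advanced_alt, hne, hm, hidx, hj]
  · simp [pointer_advanced_alt, hne, hm]

-- A's loop in the searching state equals acc ++ B's result
theorem pvAB (coordinate : List Int) :
    ∀ (l : List (Option (List Int))) (acc : List (Option (List Int))),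
      (l.foldl
        (fun (acc : List (Option (List Int)) × Int) e =>
          if e = none ∧ acc.2 = 0 then (acc.1 ++ [some coordinate], acc.2 + 1)
          else (acc.1 ++ [e], acc.2))
        (acc, 0)).1 = acc ++ pointer_advanced_alt l coordinate := by
  intro l
  induction l with
  | nil => intro acc; simp [pointer_advanced_alt]
  | cons e l ih =>
    intro acc
    by_cases he : e = none
    · subst he
      have h1 : pointer_advanced_alt (none :: l) coordinate = some coordinate :: l := by
        simp [pointer_advanced_alt, List.idxOf?, List.findIdx?_cons]
      simp only [List.foldl_cons]
      rw [if_pos (by exact ⟨trivial, trivial⟩), pvA_loop_done coordinate l (acc ++ [some coordinate]) (0 + 1) (by norm_num), h1]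
      simp
    · simp only [List.foldl_cons]
      rw [if_neg (by simp [he])]
      rw [ih (acc ++ [e]), pvB_cons_ne coordinate e l he]
      simp

-- ===== VERDICT (by name: the statement is the Claim_ definition above) =====
theorem pointer_advanced_spec : Claim_equal_pointer_advanced := by
  intro old coord _
  unfold Spec_pointer_advanced pointer_advanced
  simpa using pvAB coord old []
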